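-- pv_equiv track=rewrite | github.com/KhalilIbrahimm/Algorithms-Engineering-INF237 | segment_trees/moviecollection.py | solve_movie_cases
-- ===== SOURCE A (Python) =====
-- def build_tree(size):
--     n = 1
--     while n < size:
--         n <<= 1
--     tree = [0] * (2 * n)
--     return tree, n
--
-- def update(tree, n, idx, val):
--     idx += n - 1
--     tree[idx] = val
--     while idx > 1:
--         idx //= 2
--         tree[idx] = tree[2 * idx] + tree[2 * idx + 1]
--
-- def query(tree, n, l, r):
--     l += n - 1
--     r += n - 1
--     res = 0
--     while l <= r:
--         if l % 2 == 1:
--             res += tree[l]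
--             l += 1
--         if r % 2 == 0:
--             res += tree[r]
--             r -= 1
--         l //= 2
--         r //= 2
--     return res
--
-- def solve_movie_cases(cases):
--     results = []
--     for m, r, reqs in cases:
--         size = m + r + 1
--         tree, base = build_tree(size)
--         pos = [0] * (m + 1)
--         for i in range(1, m + 1):
--             idx = m - i + 1
--             pos[i] = idx
--             update(tree, base, idx, 1)
--
--         top = m
--         res = []
--         for f in reqs:
--             idx = pos[f]
--             res.append(str(query(tree, base, idx + 1, top)))
--             update(tree, base, idx, 0)
--             top += 1
--             pos[f] = top
--             update(tree, base, top, 1)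
--         results.append(" ".join(res))
--     return results
-- ===== SOURCE B (Python) =====
-- def solve_movie_cases(cases):
--     results = []
--     for m, r, reqs in cases:
--         pos = [0] * (m + 1)
--         for i in range(1, m + 1):
--             pos[i] = m - i + 1
--         top = m
--         out = []
--         for f in reqs:
--             p = pos[f]
--             out.append(str(sum(1 for q in pos if q > p)))
--             top += 1
--             pos[f] = top
--         results.append(" ".join(out))
--     return results
-- ===== Notes on version B (the rewrite author's own statement) =====
-- stated objective: simpler
-- what changed: Replaces the whole segment tree (power-of-two sizing, point update, bottom-up range query) with a plain position array and a direct linear count of positions above the requested one; no tree at all, ~4x less code.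
import Mathlib
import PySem

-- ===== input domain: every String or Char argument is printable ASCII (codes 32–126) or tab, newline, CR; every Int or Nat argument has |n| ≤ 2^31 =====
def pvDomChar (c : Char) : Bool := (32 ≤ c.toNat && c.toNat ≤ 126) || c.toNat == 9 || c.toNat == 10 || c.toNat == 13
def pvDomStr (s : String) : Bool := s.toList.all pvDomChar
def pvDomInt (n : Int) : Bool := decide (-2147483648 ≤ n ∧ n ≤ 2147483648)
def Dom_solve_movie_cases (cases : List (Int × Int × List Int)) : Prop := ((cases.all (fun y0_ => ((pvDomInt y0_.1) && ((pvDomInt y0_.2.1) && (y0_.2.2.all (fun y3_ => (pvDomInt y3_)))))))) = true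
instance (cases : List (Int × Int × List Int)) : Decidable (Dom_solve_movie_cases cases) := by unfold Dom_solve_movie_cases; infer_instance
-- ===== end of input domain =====

-- B replaces A's segment tree by a plain position array and a direct linear count (simpler, no tree);
-- equal output on every input where A returns (Pre_ excludes exactly A's IndexError crashes).

-- ===== PORT A =====

-- 'while n < size: n <<= 1'  (the '0 < n' conjunct is only a totality guard: A always starts from n = 1)
def pvGrow (size : Int) (n : Nat) : Nat :=
  if h : 0 < n ∧ (n : Int) < size then pvGrow size (2 * n) else n
termination_by (size - n).toNat
decreasing_by push_cast; omega

-- the 'while idx > 1' loop of A's update, after tree[idx] = val was done (idx here is the leaf index)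
def segClimb (t : List Int) (idx : Nat) : List Int :=
  if 1 < idx then
    let i := idx / 2
    segClimb (t.set i (t.getD (2 * i) 0 + t.getD (2 * i + 1) 0)) i
  else t
termination_by idx
decreasing_by omega

-- A's update: tree[idx+n-1] = val, then climb.  On every admitted run idx ≥ 0 and n ≥ 1, so toNat is exact.
def segUpdate (t : List Int) (n : Nat) (idx val : Int) : List Int :=
  let j := (idx + n - 1).toNat
  segClimb (t.set j val) j

-- A's query loop (l, r already offset by n-1).  The '0 < l' conjunct is a totality guard only:
-- on every admitted run l ≥ 1 holds throughout (initially l ≥ n ≥ 1).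
def segQuery (t : List Int) (l r : Nat) (res : Int) : Int :=
  if h : 0 < l ∧ l ≤ r then
    let res1 := if l % 2 = 1 then res + t.getD l 0 else res
    let l1 := if l % 2 = 1 then l + 1 else l
    let res2 := if r % 2 = 0 then res1 + t.getD r 0 else res1
    let r1 := if r % 2 = 0 then r - 1 else r
    segQuery t (l1 / 2) (r1 / 2) res2
  else res
termination_by r
decreasing_by split_ifs <;> omega

def segQueryTop (t : List Int) (n : Nat) (l r : Int) : Int :=
  segQuery t (l + n - 1).toNat (r + n - 1).toNat 0

-- 'for i in range(1, m + 1): idx = m - i + 1; pos[i] = idx; update(tree, base, idx, 1)'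
def aInit (n : Nat) (m : Int) (is_ : List Int) (tree pos : List Int) : List Int × List Int :=
  match is_ with
  | [] => (tree, pos)
  | i :: rest =>
      let idx := m - i + 1
      aInit n m rest (segUpdate tree n idx 1) (PySem.List.pySetD pos i idx)

-- 'for f in reqs: …'
def aLoop (n : Nat) (reqs : List Int) (tree pos : List Int) (top : Int) (res : List String) : List String :=
  match reqs with
  | [] => res
  | f :: rest =>
      let idx := PySem.List.pyGetD pos f 0
      let res' := res ++ [PySem.Int.toStr (segQueryTop tree n (idx + 1) top)]
      let tree' := segUpdate tree n idx 0
      let top' := top + 1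
      let pos' := PySem.List.pySetD pos f top'
      let tree'' := segUpdate tree' n top' 1
      aLoop n rest tree'' pos' top' res'

def caseA (m r : Int) (reqs : List Int) : String :=
  let size := m + r + 1
  let n := pvGrow size 1
  let tp := aInit n m (PySem.List.pyRange 1 (m + 1) 1)
              (List.replicate (2 * n) 0) (List.replicate (m + 1).toNat 0)
  PySem.Str.join " " (aLoop n reqs tp.1 tp.2 m [])

def solve_movie_cases (cases : List (Int × Int × List Int)) : List String :=
  cases.foldl (fun acc c => acc ++ [caseA c.1 c.2.1 c.2.2]) []

-- ===== PORT B =====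

-- 'for f in reqs: p = pos[f]; out.append(str(sum(1 for q in pos if q > p))); top += 1; pos[f] = top'
def bLoop (reqs : List Int) (pos : List Int) (top : Int) (out : List String) : List String :=
  match reqs with
  | [] => out
  | f :: rest =>
      let p := PySem.List.pyGetD pos f 0
      let cnt := pos.foldl (fun acc q => if q > p then acc + 1 else acc) (0 : Int)
      let out' := out ++ [PySem.Int.toStr cnt]
      let top' := top + 1
      bLoop rest (PySem.List.pySetD pos f top') top' out'

-- 'pos = [0] * (m + 1); for i in range(1, m + 1): pos[i] = m - i + 1'
def caseB (m : Int) (reqs : List Int) : String :=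
  let pos0 := (PySem.List.pyRange 1 (m + 1) 1).foldl
                (fun ps i => PySem.List.pySetD ps i (m - i + 1)) (List.replicate (m + 1).toNat 0)
  PySem.Str.join " " (bLoop reqs pos0 m [])

def solve_movie_cases_alt (cases : List (Int × Int × List Int)) : List String :=
  cases.foldl (fun acc c => acc ++ [caseB c.1 c.2.2]) []

-- ===== PRECONDITION & SPEC =====
-- Pre_ excludes exactly the inputs on which A raises IndexError: a request outside -(m+1)..m,
-- a nonempty request list with m < 0, or m + len(reqs) movies exceeding the padded power-of-two
-- tree capacity (the smallest power of two > m + r).  On every other input A returns and B matches.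
def Pre_solve_movie_cases (cases : List (Int × Int × List Int)) : Prop :=
  ∀ c ∈ cases,
    (c.1 < 0 → c.2.2 = []) ∧
    (0 ≤ c.1 →
      (∀ f ∈ c.2.2, -(c.1 + 1) ≤ f ∧ f ≤ c.1) ∧
      c.1 + (c.2.2.length : Int) ≤
        (if c.1 + c.2.1 ≤ 0 then 1 else (2 : Int) ^ PySem.Int.bitLength (c.1 + c.2.1)))
instance (cases : List (Int × Int × List Int)) : Decidable (Pre_solve_movie_cases cases) := by
  unfold Pre_solve_movie_cases; infer_instance

def pvWitness_solve_movie_cases : (List (Int × Int × List Int)) := [(3, 2, [1, 3])]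

def Spec_solve_movie_cases (cases : List (Int × Int × List Int)) (out : List String) : Prop := out = solve_movie_cases_alt cases
instance (cases : List (Int × Int × List Int)) (out : List String) : Decidable (Spec_solve_movie_cases cases out) := by unfold Spec_solve_movie_cases; infer_instance

-- ===== CLAIM (what is proved, stated in full; the proofs are below) =====
def Claim_equal_solve_movie_cases : Prop := ∀ (cases : List (Int × Int × List Int)), Dom_solve_movie_cases cases → Pre_solve_movie_cases cases → Spec_solve_movie_cases cases (solve_movie_cases cases)

-- ===== LEMMAS AND PROOFS =====

-- v is a strict ancestor of idx in the heap order
def isAnc (v idx : Nat) : Prop := ∃ k, 1 ≤ k ∧ v = idx / 2 ^ k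

-- the right spine: the leaf of position n (index 2n-1) and its ancestors; every node whose
-- range contains position n.  A's update at idx = 0 (the padding slot) writes only here.
def Spine (n v : Nat) : Prop := v = 2 * n - 1 ∨ isAnc v (2 * n - 1)

-- the segment-tree invariant: length, parent sums off the right spine, and leaf p (1 ≤ p ≤ n) holding a p
def Good (n : Nat) (t : List Int) (a : Nat → Int) : Prop :=
  t.length = 2 * n ∧
  (∀ v, 1 ≤ v → v < n → ¬ Spine n v → t.getD v 0 = t.getD (2 * v) 0 + t.getD (2 * v + 1) 0) ∧
  (∀ p, 1 ≤ p → p ≤ n → t.getD (n - 1 + p) 0 = a p)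

-- occupancy of a position assignment P on slots 0..m (slot 0 is the padding cell)
def aP (m : Int) (P : Int → Int) : Nat → Int :=
  fun q => if (PySem.List.pyRange 0 (m + 1) 1).any (fun s => decide (P s = (q : Int))) then 1 else 0

lemma isAnc_iff (v idx : Nat) : isAnc v idx ↔ v = idx / 2 ∨ isAnc v (idx / 2) := by
  constructor
  · rintro ⟨k, hk, rfl⟩
    rcases Nat.eq_or_lt_of_le hk with h1 | h2
    · left; rw [← h1]; simp
    · right
      refine ⟨k - 1, by omega, ?_⟩
      rw [Nat.div_div_eq_div_mul]
      congr 1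
      rw [← pow_succ']
      congr 1
      omega
  · rintro (rfl | ⟨k, hk, rfl⟩)
    · exact ⟨1, le_refl _, by simp⟩
    · refine ⟨k + 1, by omega, ?_⟩
      rw [Nat.div_div_eq_div_mul, ← pow_succ']

lemma spine_child (n v c : Nat) (hn : 1 ≤ n) (hc : c = 2 * v ∨ c = 2 * v + 1) (hs : Spine n c) :
    Spine n v := by
  rcases hs with h | ⟨k, hk, hck⟩
  · right
    refine ⟨1, le_refl _, ?_⟩
    subst h
    rcases hc with h2 | h2 <;> omega
  · right
    refine ⟨k + 1, by omega, ?_⟩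
    have he : (2 * n - 1) / 2 ^ (k + 1) = ((2 * n - 1) / 2 ^ k) / 2 := by
      rw [Nat.div_div_eq_div_mul, pow_succ]
    rw [he, ← hck]
    rcases hc with h2 | h2 <;> omega

lemma segClimb_length (t : List Int) (idx : Nat) : (segClimb t idx).length = t.length := by
  induction t, idx using segClimb.induct with
  | case1 t idx h i ih => rw [segClimb, if_pos h]; simpa using ih
  | case2 t idx h => rw [segClimb, if_neg h]

lemma segClimb_getD_high (t : List Int) (idx : Nat) :
    ∀ k, idx / 2 < k → (segClimb t idx).getD k 0 = t.getD k 0 := by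
  induction t, idx using segClimb.induct with
  | case1 t idx h i ih =>
      intro k hk
      rw [segClimb, if_pos h]
      rw [ih k (by omega)]
      have : i ≠ k := by omega
      simp [List.getD, List.getElem?_set_ne this]
  | case2 t idx h => intro k hk; rw [segClimb, if_neg h]

lemma segClimb_notanc (t : List Int) (idx : Nat) :
    ∀ k, ¬ isAnc k idx → (segClimb t idx).getD k 0 = t.getD k 0 := by
  induction t, idx using segClimb.induct with
  | case1 t idx h i ih =>
      intro k hk
      rw [segClimb, if_pos h]
      have hki : ¬ isAnc k i := fun hh => hk ((isAnc_iff k idx).mpr (Or.inr hh))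
      rw [ih k hki]
      have : i ≠ k := by
        intro hh
        exact hk ((isAnc_iff k idx).mpr (Or.inl hh.symm))
      simp [List.getD, List.getElem?_set_ne this]
  | case2 t idx h => intro k hk; rw [segClimb, if_neg h]

lemma segClimb_parent (n : Nat) (E : Nat → Prop) (t : List Int) (idx : Nat)
    (hlen : t.length = 2 * n) (hidx : idx < 2 * n)
    (H : ∀ v, 1 ≤ v → v < n → ¬ E v → ¬ isAnc v idx →
      t.getD v 0 = t.getD (2 * v) 0 + t.getD (2 * v + 1) 0) :
    ∀ v, 1 ≤ v → v < n → ¬ E v →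
      (segClimb t idx).getD v 0 = (segClimb t idx).getD (2 * v) 0 + (segClimb t idx).getD (2 * v + 1) 0 := by
  induction t, idx using segClimb.induct with
  | case2 t idx h =>
      intro v h1 h2 hE
      rw [segClimb, if_neg h]
      refine H v h1 h2 hE ?_
      rintro ⟨k, hk, hv⟩
      have h2k : 2 ≤ 2 ^ k := by
        calc 2 = 2 ^ 1 := by norm_num
        _ ≤ 2 ^ k := Nat.pow_le_pow_right (by norm_num) hk
      have : idx / 2 ^ k = 0 := Nat.div_eq_of_lt (by omega)
      omega
  | case1 t idx h i ih =>
      intro v h1 h2 hE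
      rw [segClimb, if_pos h]
      set t1 := t.set i (t.getD (2 * i) 0 + t.getD (2 * i + 1) 0) with ht1
      have hlen1 : t1.length = 2 * n := by simpa [ht1] using hlen
      refine ih hlen1 (by omega) ?_ v h1 h2 hE
      intro w hw1 hw2 hwE hwna
      by_cases hwi : w = i
      · have hi1 : i < t.length := by omega
        have g0 : t1.getD i 0 = t.getD (2 * i) 0 + t.getD (2 * i + 1) 0 := by
          simp [ht1, List.getD, List.getElem?_set_self hi1]
        have g1 : t1.getD (2 * i) 0 = t.getD (2 * i) 0 := by
          have : i ≠ 2 * i := by omega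
          simp [ht1, List.getD, List.getElem?_set_ne this]
        have g2 : t1.getD (2 * i + 1) 0 = t.getD (2 * i + 1) 0 := by
          have : i ≠ 2 * i + 1 := by omega
          simp [ht1, List.getD, List.getElem?_set_ne this]
        rw [hwi, g0, g1, g2]
      · have hna : ¬ isAnc w idx := by
          rw [isAnc_iff]
          rintro (h' | h')
          · exact hwi h'
          · exact hwna h'
        have e0 : t1.getD w 0 = t.getD w 0 := by
          have : i ≠ w := fun hh => hwi hh.symm
          simp [ht1, List.getD, List.getElem?_set_ne this]
        have e1 : t1.getD (2 * w) 0 = t.getD (2 * w) 0 := by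
          have : i ≠ 2 * w := by
            intro hh
            exact hwna ⟨1, le_refl _, by omega⟩
          simp [ht1, List.getD, List.getElem?_set_ne this]
        have e2 : t1.getD (2 * w + 1) 0 = t.getD (2 * w + 1) 0 := by
          have : i ≠ 2 * w + 1 := by
            intro hh
            exact hwna ⟨1, le_refl _, by omega⟩
          simp [ht1, List.getD, List.getElem?_set_ne this]
        rw [e0, e1, e2]
        exact H w hw1 hw2 hwE hna

lemma segUpdate_good (n : Nat) (t : List Int) (a : Nat → Int) (p : Nat) (val : Int)
    (hg : Good n t a) (hp1 : 1 ≤ p) (hpn : p ≤ n) :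
    Good n (segUpdate t n (p : Int) val) (fun q => if q = p then val else a q) := by
  obtain ⟨hlen, hpar, hleaf⟩ := hg
  have hn : 1 ≤ n := le_trans hp1 hpn
  have hj : ((p : Int) + n - 1).toNat = n - 1 + p := by omega
  unfold segUpdate
  rw [hj]
  set j := n - 1 + p with hjdef
  have hjlt : j < t.length := by omega
  have hlen1 : (t.set j val).length = 2 * n := by simpa using hlen
  refine ⟨by rw [segClimb_length]; exact hlen1, ?_, ?_⟩
  · refine segClimb_parent n (Spine n) _ j hlen1 (by omega) ?_
    intro v h1 h2 hE hna
    have e0 : (t.set j val).getD v 0 = t.getD v 0 := by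
      have : j ≠ v := by omega
      simp [List.getD, List.getElem?_set_ne this]
    have e1 : (t.set j val).getD (2 * v) 0 = t.getD (2 * v) 0 := by
      have : j ≠ 2 * v := by
        intro hh
        exact hna ⟨1, le_refl _, by omega⟩
      simp [List.getD, List.getElem?_set_ne this]
    have e2 : (t.set j val).getD (2 * v + 1) 0 = t.getD (2 * v + 1) 0 := by
      have : j ≠ 2 * v + 1 := by
        intro hh
        exact hna ⟨1, le_refl _, by omega⟩
      simp [List.getD, List.getElem?_set_ne this]
    rw [e0, e1, e2]
    exact hpar v h1 h2 hE
  · intro q hq1 hqn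
    rw [segClimb_getD_high _ _ _ (by omega)]
    by_cases hqp : q = p
    · subst hqp
      rw [← hjdef]
      simp [List.getD, List.getElem?_set_self hjlt]
    · have : j ≠ n - 1 + q := by omega
      simp only [List.getD, List.getElem?_set_ne this]
      simp only [if_neg hqp]
      have := hleaf q hq1 hqn
      simpa [List.getD] using this

-- A's update at idx = 0 (pos[0] of the padding slot) writes tree[n-1] and climbs: it touches
-- only the right spine, so the invariant survives with the SAME abstract array.
lemma segUpdate_spine (n : Nat) (t : List Int) (a : Nat → Int) (val : Int)
    (hn : 1 ≤ n) (hg : Good n t a) :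
    Good n (segUpdate t n 0 val) a := by
  obtain ⟨hlen, hpar, hleaf⟩ := hg
  have hj : ((0 : Int) + n - 1).toNat = n - 1 := by omega
  unfold segUpdate
  rw [hj]
  have hspine : Spine n (n - 1) := by
    right
    exact ⟨1, le_refl _, by omega⟩
  have hlen1 : (t.set (n - 1) val).length = 2 * n := by simpa using hlen
  have hanc : ∀ w, isAnc w (n - 1) → Spine n w := by
    rintro w ⟨k, hk, rfl⟩
    right
    refine ⟨k + 1, by omega, ?_⟩
    have h1 : ((2 * n - 1) / 2) / 2 ^ k = (2 * n - 1) / 2 ^ (k + 1) := by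
      rw [Nat.div_div_eq_div_mul, ← pow_succ']
    rw [← h1]
    congr 1
    omega
  refine ⟨by rw [segClimb_length]; exact hlen1, ?_, ?_⟩
  · intro v h1 h2 hE
    have hv0 : ¬ isAnc v (n - 1) := fun hh => hE (hanc v hh)
    have hv1 : ¬ isAnc (2 * v) (n - 1) := fun hh =>
      hE (spine_child n v (2 * v) hn (Or.inl rfl) (hanc _ hh))
    have hv2 : ¬ isAnc (2 * v + 1) (n - 1) := fun hh =>
      hE (spine_child n v (2 * v + 1) hn (Or.inr rfl) (hanc _ hh))
    rw [segClimb_notanc _ _ _ hv0, segClimb_notanc _ _ _ hv1, segClimb_notanc _ _ _ hv2]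
    have e0 : (t.set (n - 1) val).getD v 0 = t.getD v 0 := by
      have : n - 1 ≠ v := by
        intro hh
        exact hE (hh ▸ hspine)
      simp [List.getD, List.getElem?_set_ne this]
    have e1 : (t.set (n - 1) val).getD (2 * v) 0 = t.getD (2 * v) 0 := by
      have : n - 1 ≠ 2 * v := by
        intro hh
        exact hE (spine_child n v (2 * v) hn (Or.inl rfl) (hh ▸ hspine))
      simp [List.getD, List.getElem?_set_ne this]
    have e2 : (t.set (n - 1) val).getD (2 * v + 1) 0 = t.getD (2 * v + 1) 0 := by
      have : n - 1 ≠ 2 * v + 1 := by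
        intro hh
        exact hE (spine_child n v (2 * v + 1) hn (Or.inr rfl) (hh ▸ hspine))
      simp [List.getD, List.getElem?_set_ne this]
    rw [e0, e1, e2]
    exact hpar v h1 h2 hE
  · intro q hq1 hqn
    rw [segClimb_getD_high _ _ _ (by omega)]
    have : n - 1 ≠ n - 1 + q := by omega
    simp only [List.getD, List.getElem?_set_ne this]
    have := hleaf q hq1 hqn
    simpa [List.getD] using this

lemma good_congr (n : Nat) (t : List Int) (a b : Nat → Int)
    (hg : Good n t a) (h : ∀ q, 1 ≤ q → q ≤ n → a q = b q) : Good n t b :=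
  ⟨hg.1, hg.2.1, fun p h1 h2 => (hg.2.2 p h1 h2).trans (h p h1 h2)⟩

lemma sum_pair (g : Nat → Int) (c d : Nat)
    (H : ∀ w, c ≤ w → w ≤ d → g w = g (2 * w) + g (2 * w + 1)) :
    ∑ w ∈ Finset.Icc c d, g w = ∑ v ∈ Finset.Icc (2 * c) (2 * d + 1), g v := by
  induction d with
  | zero =>
      rcases Nat.eq_zero_or_pos c with rfl | hc
      · have h0 := H 0 (le_refl _) (le_refl _)
        norm_num at h0
        rw [show (2 : ℕ) * 0 = 0 from rfl, show (2 : ℕ) * 0 + 1 = 0 + 1 from rfl,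
            Finset.sum_Icc_succ_top (by omega)]
        simp only [Finset.Icc_self, Finset.sum_singleton, Nat.zero_add]
        omega
      · rw [Finset.Icc_eq_empty (by omega), Finset.Icc_eq_empty (by omega)]
  | succ d ih =>
      by_cases hc : c ≤ d + 1
      · have e1 : ∑ w ∈ Finset.Icc c (d + 1), g w = (∑ w ∈ Finset.Icc c d, g w) + g (d + 1) :=
          Finset.sum_Icc_succ_top hc _
        have e2 : ∑ v ∈ Finset.Icc (2 * c) (2 * (d + 1) + 1), g v
            = (∑ v ∈ Finset.Icc (2 * c) (2 * d + 1), g v) + g (2 * d + 2) + g (2 * d + 3) := by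
          rw [show 2 * (d + 1) + 1 = (2 * d + 2) + 1 by ring,
              Finset.sum_Icc_succ_top (by omega) _,
              show 2 * d + 2 = (2 * d + 1) + 1 by ring,
              Finset.sum_Icc_succ_top (by omega) _]
        rw [e1, e2, ih (fun w hw1 hw2 => H w hw1 (by omega)), H (d + 1) hc (le_refl _)]
        ring_nf
      · rw [Finset.Icc_eq_empty (by omega), Finset.Icc_eq_empty (by omega)]

lemma icc_peel (g : Nat → Int) (l r : Nat) (hl : 0 < l) (hlr : l ≤ r) :
    ∑ v ∈ Finset.Icc l r, g v =
      (if l % 2 = 1 then g l else 0)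
      + (∑ v ∈ Finset.Icc (if l % 2 = 1 then l + 1 else l) (if r % 2 = 0 then r - 1 else r), g v)
      + (if r % 2 = 0 then g r else 0) := by
  have peel_bot : ∀ a b : Nat, a ≤ b → ∑ v ∈ Finset.Icc a b, g v = g a + ∑ v ∈ Finset.Icc (a + 1) b, g v := by
    intro a b hab
    have hIoc : Finset.Ioc a b = Finset.Icc (a + 1) b := by
      ext x; simp only [Finset.mem_Ioc, Finset.mem_Icc]; omega
    rw [Finset.Icc_eq_cons_Ioc hab, Finset.sum_cons, hIoc]
  have peel_top : ∀ a b : Nat, a ≤ b → 0 < b → ∑ v ∈ Finset.Icc a b, g v = (∑ v ∈ Finset.Icc a (b - 1), g v) + g b := by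
    intro a b hab hb
    obtain ⟨b', rfl⟩ : ∃ b', b = b' + 1 := ⟨b - 1, by omega⟩
    rw [Finset.sum_Icc_succ_top (by omega), Nat.add_sub_cancel]
  split_ifs with h1 h2 h2
  · -- l odd, r even: l < r
    have hlr' : l < r := by omega
    rw [peel_bot l r (by omega), peel_top (l + 1) r (by omega) (by omega)]
    ring
  · -- l odd, r odd
    rw [peel_bot l r hlr]
    ring
  · -- l even, r even
    rw [peel_top l r hlr (by omega)]
    ring
  · -- l even, r odd
    ring

lemma notspine_between (n s w : Nat) (hs : ∃ k, s = (2 * n - 1) / 2 ^ k)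
    (h1 : s / 4 < w) (h2 : w < s / 2) : ¬ Spine n w := by
  obtain ⟨k, rfl⟩ := hs
  rintro (h | ⟨j, hj, hw⟩)
  · -- w = 2n-1 ≥ s ≥ ... but w < s/2 ≤ s ≤ 2n-1
    have : (2 * n - 1) / 2 ^ k ≤ 2 * n - 1 := Nat.div_le_self _ _
    omega
  · -- w = (2n-1)/2^j
    rcases le_or_gt j (k + 1) with hle | hgt
    · -- w ≥ (2n-1)/2^(k+1) = s/2
      have hmono : (2 * n - 1) / 2 ^ (k + 1) ≤ (2 * n - 1) / 2 ^ j :=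
        Nat.div_le_div_left (Nat.pow_le_pow_right (by norm_num) hle) (by positivity)
      have hhalf : (2 * n - 1) / 2 ^ (k + 1) = ((2 * n - 1) / 2 ^ k) / 2 := by
        rw [Nat.div_div_eq_div_mul, ← pow_succ]
      omega
    · -- j ≥ k + 2: w ≤ s/4
      obtain ⟨d, rfl⟩ : ∃ d, j = k + 2 + d := ⟨j - k - 2, by omega⟩
      have he2 : (2 : ℕ) ^ k * (4 * 2 ^ (k + 2 + d - k - 2)) = 2 ^ (k + 2 + d) := by
        rw [show k + 2 + d - k - 2 = d by omega, pow_add, pow_add]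
        ring
      have he : (2 * n - 1) / 2 ^ (k + 2 + d) = (((2 * n - 1) / 2 ^ k) / 4) / 2 ^ (k + 2 + d - k - 2) := by
        rw [Nat.div_div_eq_div_mul, Nat.div_div_eq_div_mul, he2]
      have : (2 * n - 1) / 2 ^ (k + 2 + d) ≤ ((2 * n - 1) / 2 ^ k) / 4 := by
        rw [he]
        exact Nat.div_le_self _ _
      omega


lemma segQuery_sum (t : List Int) (n : Nat)
    (Hpar : ∀ v, 1 ≤ v → v < n → ¬ Spine n v → t.getD v 0 = t.getD (2 * v) 0 + t.getD (2 * v + 1) 0) :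
    ∀ r l res s, 1 ≤ l → r < 2 * n → (∃ k, s = (2 * n - 1) / 2 ^ k) → s / 2 < l → r < s →
      segQuery t l r res = res + ∑ v ∈ Finset.Icc l r, t.getD v 0 := by
  intro r
  induction r using Nat.strong_induction_on with
  | _ r ih =>
    intro l res s hl hr hsk hsl hrs
    by_cases hg : 0 < l ∧ l ≤ r
    · obtain ⟨hg1, hg2⟩ := hg
      have step : segQuery t l r res =
          segQuery t ((if l % 2 = 1 then l + 1 else l) / 2) ((if r % 2 = 0 then r - 1 else r) / 2)
            (if r % 2 = 0 then (if l % 2 = 1 then res + t.getD l 0 else res) + t.getD r 0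
             else (if l % 2 = 1 then res + t.getD l 0 else res)) := by
        rw [segQuery, dif_pos ⟨hg1, hg2⟩]
      set l1 := if l % 2 = 1 then l + 1 else l with hl1
      set r1 := if r % 2 = 0 then r - 1 else r with hr1
      have hl1e : l1 % 2 = 0 := by rw [hl1]; split_ifs <;> omega
      have hr1o : r1 % 2 = 1 := by rw [hr1]; split_ifs <;> omega
      have hl1b : 2 ≤ l1 := by rw [hl1]; split_ifs <;> omega
      have hr1b : r1 ≤ r := by rw [hr1]; split_ifs <;> omega
      have hl1l : l ≤ l1 := by rw [hl1]; split_ifs <;> omega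
      obtain ⟨k, hks⟩ := hsk
      have hs2 : ∃ k', s / 2 = (2 * n - 1) / 2 ^ k' := by
        refine ⟨k + 1, ?_⟩
        rw [hks, Nat.div_div_eq_div_mul, ← pow_succ]
      rw [step, ih (r1 / 2) (by omega) (l1 / 2) _ (s / 2) (by omega) (by omega) hs2 (by omega) (by omega)]
      rw [icc_peel (fun v => t.getD v 0) l r hg1 hg2, ← hl1, ← hr1]
      have hp : ∑ w ∈ Finset.Icc (l1 / 2) (r1 / 2), t.getD w 0
          = ∑ v ∈ Finset.Icc (2 * (l1 / 2)) (2 * (r1 / 2) + 1), t.getD v 0 := by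
        refine sum_pair _ _ _ ?_
        intro w hw1 hw2
        refine Hpar w (by omega) (by omega) ?_
        exact notspine_between n s w ⟨k, hks⟩ (by omega) (by omega)
      rw [hp, show 2 * (l1 / 2) = l1 by omega, show 2 * (r1 / 2) + 1 = r1 by omega]
      split_ifs <;> ring
    · rw [segQuery, dif_neg hg, Finset.Icc_eq_empty (by omega)]
      simp

lemma good_query (n : Nat) (t : List Int) (a : Nat → Int) (hg : Good n t a)
    (l r : Nat) (hl : 1 ≤ l) (hr : r ≤ n - 1) (hn : 1 ≤ n) :
    segQuery t (n - 1 + l) (n - 1 + r) 0 = ∑ p ∈ Finset.Icc l r, a p := by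
  obtain ⟨hlen, hpar, hleaf⟩ := hg
  rw [segQuery_sum t n hpar (n - 1 + r) (n - 1 + l) 0 (2 * n - 1) (by omega) (by omega)
      ⟨0, by norm_num⟩ (by omega) (by omega), zero_add]
  rw [← Finset.map_add_left_Icc]
  rw [Finset.sum_map]
  refine Finset.sum_congr rfl ?_
  intro p hp
  simp only [Finset.mem_Icc] at hp
  simpa using hleaf p (by omega) (by omega)

-- Python's negative-index write xs[-k] = v  (derived by unfolding the PySem primitive; exact)
lemma pySetD_neg {α : Type} (xs : List α) (k : Nat) (v : α) (h1 : 0 < k) (h2 : k ≤ xs.length) :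
    PySem.List.pySetD xs (-(k : Int)) v = xs.set (xs.length - k) v := by
  simp only [PySem.List.pySetD, PySem.List.pySet?, PySem.List.pyIdx?]
  rw [if_neg (by omega), if_pos (by omega)]
  simp only [Option.map_some, Option.getD_some]
  congr 1
  omega

-- the bridge: occupancy sum over (P g, top] = how many slots sit above slot g
lemma count_above (m top : Int) (P : Int → Int) (g : Int)
    (hinj : ∀ i j, 0 ≤ i → i ≤ m → 0 ≤ j → j ≤ m → P i = P j → 1 ≤ P i → i = j)
    (hbnd : ∀ i, 0 ≤ i → i ≤ m → 0 ≤ P i ∧ P i ≤ top)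
    (hg0 : 0 ≤ g) (hgm : g ≤ m)
    (l r : Nat) (hl : (l : Int) = P g + 1) (hr : (r : Int) = top) :
    ∑ p ∈ Finset.Icc l r, aP m P p =
      ((PySem.List.pyRange 0 (m + 1) 1).countP (fun i => decide (P g < P i)) : Int) := by
  have hsum : ∑ p ∈ Finset.Icc l r, aP m P p =
      (((Finset.Icc l r).filter
        (fun q : Nat => ((PySem.List.pyRange 0 (m + 1) 1).any (fun s => decide (P s = (q : Int)))) = true)).card : Int) := by
    rw [← Finset.sum_boole]
    rfl
  set T := (PySem.List.pyRange 0 (m + 1) 1).filter (fun i => decide (P g < P i)) with hT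
  have hTnd : T.Nodup := (PySem.List.nodup_pyRange_one 0 (m + 1)).filter _
  have hcount : (PySem.List.pyRange 0 (m + 1) 1).countP (fun i => decide (P g < P i)) = T.toFinset.card := by
    rw [List.countP_eq_length_filter, ← hT, List.toFinset_card_of_nodup hTnd]
  have hmemT : ∀ x : Int, x ∈ T.toFinset ↔ (0 ≤ x ∧ x ≤ m) ∧ P g < P x := by
    intro x
    rw [List.mem_toFinset, hT, List.mem_filter, PySem.List.mem_pyRange_one]
    simp only [decide_eq_true_eq]
    omega
  have hcard : T.toFinset.card =
      ((Finset.Icc l r).filter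
        (fun q : Nat => ((PySem.List.pyRange 0 (m + 1) 1).any (fun s => decide (P s = (q : Int)))) = true)).card := by
    refine Finset.card_bij (fun a _ => (P a).toNat) ?_ ?_ ?_
    · intro a ha
      rw [hmemT] at ha
      obtain ⟨⟨ha1, ham⟩, haf⟩ := ha
      obtain ⟨hP1, hPt⟩ := hbnd a ha1 ham
      have hPg := (hbnd g hg0 hgm).1
      rw [Finset.mem_filter, Finset.mem_Icc]
      beta_reduce
      refine ⟨⟨by omega, by omega⟩, ?_⟩
      rw [List.any_eq_true]
      refine ⟨a, ?_, ?_⟩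
      · rw [PySem.List.mem_pyRange_one]; omega
      · simp only [decide_eq_true_eq]; omega
    · intro a1 ha1 a2 ha2 heq
      beta_reduce at heq
      rw [hmemT] at ha1 ha2
      have hb1 := hbnd a1 ha1.1.1 ha1.1.2
      have hb2 := hbnd a2 ha2.1.1 ha2.1.2
      have hPg := (hbnd g hg0 hgm).1
      exact hinj a1 a2 ha1.1.1 ha1.1.2 ha2.1.1 ha2.1.2 (by omega) (by omega)
    · intro b hb
      rw [Finset.mem_filter, Finset.mem_Icc] at hb
      obtain ⟨⟨hbl, hbr⟩, hbany⟩ := hb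
      rw [List.any_eq_true] at hbany
      obtain ⟨i, hiR, hiP⟩ := hbany
      rw [PySem.List.mem_pyRange_one] at hiR
      simp only [decide_eq_true_eq] at hiP
      have hfb := (hbnd g hg0 hgm).1
      refine ⟨i, ?_, by beta_reduce; omega⟩
      rw [hmemT]
      exact ⟨⟨by omega, by omega⟩, by omega⟩
  rw [hsum, hcount, hcard]

lemma pvGrow_ge (size : Int) : ∀ n : Nat, 0 < n → 0 < pvGrow size n ∧ size ≤ (pvGrow size n : Int) := by
  intro n
  induction n using pvGrow.induct (size := size) with
  | case1 n h ih =>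
      intro _
      rw [pvGrow, dif_pos h]
      exact ih (by omega)
  | case2 n h =>
      intro hn
      rw [pvGrow, dif_neg h]
      exact ⟨hn, by omega⟩

lemma pvGrow_pow2 (size : Int) : ∀ n : Nat, (∃ j, n = 2 ^ j) → ∃ k, pvGrow size n = 2 ^ k := by
  intro n
  induction n using pvGrow.induct (size := size) with
  | case1 n h ih =>
      rintro ⟨j, rfl⟩
      rw [pvGrow, dif_pos h]
      exact ih ⟨j + 1, by rw [pow_succ']⟩
  | case2 n h =>
      rintro ⟨j, rfl⟩
      rw [pvGrow, dif_neg h]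
      exact ⟨j, rfl⟩

-- the capacity bound of Pre_ is at most the tree width A actually builds
lemma N_le_pvGrow (m r : Int) :
    (if m + r ≤ 0 then 1 else (2 : Int) ^ PySem.Int.bitLength (m + r)) ≤ (pvGrow (m + r + 1) 1 : Int) := by
  obtain ⟨hpos, hge⟩ := pvGrow_ge (m + r + 1) 1 (by norm_num)
  split_ifs with h
  · exact_mod_cast hpos
  · push_neg at h
    obtain ⟨k, hk⟩ := pvGrow_pow2 (m + r + 1) 1 ⟨0, rfl⟩
    rw [hk]
    rw [hk] at hge
    have hbl := PySem.Int.two_pow_bitLength_le (m + r) (by omega)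
    have habs : (m + r).natAbs < 2 ^ k := by
      have : (m + r : Int) < ((2 : Nat) ^ k : Int) := by push_cast at hge ⊢; omega
      omega
    have hlek : PySem.Int.bitLength (m + r) - 1 < k := by
      by_contra hc
      push_neg at hc
      have := Nat.pow_le_pow_right (show 1 ≤ 2 by norm_num) hc
      omega
    have : PySem.Int.bitLength (m + r) ≤ k := by
      rcases Nat.eq_zero_or_pos (PySem.Int.bitLength (m + r)) with h0 | h0
      · omega
      · omega
    calc ((2 : Int)) ^ PySem.Int.bitLength (m + r) ≤ (2 : Int) ^ k :=
          pow_le_pow_right₀ (by norm_num) this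
    _ = ((2 ^ k : Nat) : Int) := by push_cast; rfl

-- reading pos[f] (possibly a Python negative index) from the position array
lemma pos_read (m : Int) (hm : 0 ≤ m) (P : Int → Int) (f : Int)
    (hf : -(m + 1) ≤ f) (hfm : f ≤ m) :
    PySem.List.pyGetD ((PySem.List.pyRange 0 (m + 1) 1).map P) f 0
      = P (if f < 0 then m + 1 + f else f) := by
  have hlen : ((PySem.List.pyRange 0 (m + 1) 1).map P).length = (m + 1).toNat := by
    rw [List.length_map, PySem.List.length_pyRange_one]
    omega
  rcases lt_or_ge f 0 with hneg | hpos
  · rw [if_pos hneg]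
    rw [show f = -(((-f).toNat : Nat) : Int) by omega]
    rw [PySem.List.pyGetD_neg_natCast _ _ _ (by omega) (by omega)]
    rw [List.getElem_map, PySem.List.getElem_pyRange_one]
    congr 1
    omega
  · rw [if_neg (by omega)]
    rw [PySem.List.pyGetD_eq_getElem _ _ hpos (by omega)]
    rw [List.getElem_map, PySem.List.getElem_pyRange_one]
    congr 1
    omega

-- writing pos[f] = v (possibly a Python negative index)
lemma pos_write (m : Int) (hm : 0 ≤ m) (P : Int → Int) (f v : Int)
    (hf : -(m + 1) ≤ f) (hfm : f ≤ m) :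
    PySem.List.pySetD ((PySem.List.pyRange 0 (m + 1) 1).map P) f v
      = (PySem.List.pyRange 0 (m + 1) 1).map
          (fun s => if s = (if f < 0 then m + 1 + f else f) then v else P s) := by
  have hlen : ((PySem.List.pyRange 0 (m + 1) 1).map P).length = (m + 1).toNat := by
    rw [List.length_map, PySem.List.length_pyRange_one]
    omega
  set g : Int := if f < 0 then m + 1 + f else f with hg
  have hg0 : 0 ≤ g := by rw [hg]; split_ifs <;> omega
  have hgm : g ≤ m := by rw [hg]; split_ifs <;> omega
  have hset : PySem.List.pySetD ((PySem.List.pyRange 0 (m + 1) 1).map P) f v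
      = ((PySem.List.pyRange 0 (m + 1) 1).map P).set g.toNat v := by
    rcases lt_or_ge f 0 with hneg | hpos
    · rw [show f = -(((-f).toNat : Nat) : Int) by omega]
      rw [pySetD_neg _ _ _ (by omega) (by omega), hlen]
      congr 1
      rw [hg, if_pos (by omega)]
      omega
    · rw [PySem.List.pySetD_of_nonneg _ _ hpos]
      congr 1
      rw [hg, if_neg (by omega)]
  rw [hset]
  refine List.ext_getElem ?_ ?_
  · rw [List.length_set, List.length_map, List.length_map]
  · intro k hk1 hk2
    rw [List.getElem_set]
    rw [List.getElem_map, List.getElem_map, PySem.List.getElem_pyRange_one]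
    have hkm : (k : Int) ≤ m := by
      rw [List.length_map, PySem.List.length_pyRange_one] at hk2
      omega
    by_cases hkg : g.toNat = k
    · rw [if_pos hkg, if_pos (by omega)]
    · rw [if_neg hkg, if_neg (by omega)]

-- [0] * (m + 1) as a map over the slot range
lemma replicate_eq_map (m : Int) (Q : Int → Int) (hQ : ∀ s, 0 ≤ s → s ≤ m → Q s = 0) :
    List.replicate (m + 1).toNat (0 : Int) = (PySem.List.pyRange 0 (m + 1) 1).map Q := by
  refine List.ext_getElem ?_ ?_
  · rw [List.length_replicate, List.length_map, PySem.List.length_pyRange_one]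
    omega
  · intro k hk1 hk2
    rw [List.getElem_replicate, List.getElem_map, PySem.List.getElem_pyRange_one]
    rw [List.length_replicate] at hk1
    rw [hQ _ (by omega) (by omega)]

lemma aInit_fst (n : Nat) (m : Int) :
    ∀ (is_ : List Int) (tree pos : List Int),
      (aInit n m is_ tree pos).1 = is_.foldl (fun t i => segUpdate t n (m - i + 1) 1) tree := by
  intro is_
  induction is_ with
  | nil => intro tree pos; rfl
  | cons i rest ih => intro tree pos; exact ih _ _

lemma aInit_snd (n : Nat) (m : Int) :
    ∀ (is_ : List Int) (tree pos : List Int),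
      (aInit n m is_ tree pos).2 = is_.foldl (fun ps i => PySem.List.pySetD ps i (m - i + 1)) pos := by
  intro is_
  induction is_ with
  | nil => intro tree pos; rfl
  | cons i rest ih => intro tree pos; exact ih _ _

lemma posfold_spec (m : Int) (hm : 0 ≤ m) :
    ∀ (k : Nat) (j : Int), (k : Int) = m + 1 - j → 1 ≤ j → j ≤ m + 1 →
    (PySem.List.pyRange j (m + 1) 1).foldl (fun ps i => PySem.List.pySetD ps i (m - i + 1))
        ((PySem.List.pyRange 0 (m + 1) 1).map (fun s => if 1 ≤ s ∧ s < j then m - s + 1 else 0))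
      = (PySem.List.pyRange 0 (m + 1) 1).map (fun s => if 1 ≤ s ∧ s ≤ m then m - s + 1 else 0) := by
  intro k
  induction k with
  | zero =>
      intro j hk hj1 hj2
      have hj : j = m + 1 := by omega
      subst hj
      rw [show PySem.List.pyRange (m + 1) (m + 1) 1 = [] from PySem.List.pyRange_one_eq_nil (le_refl _),
          List.foldl_nil]
      refine List.map_congr_left ?_
      intro s hs
      by_cases hc : 1 ≤ s ∧ s ≤ m
      · rw [if_pos (by omega), if_pos hc]
      · rw [if_neg (by omega), if_neg hc]
  | succ k ih =>
      intro j hk hj1 hj2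
      have hjm : j < m + 1 := by omega
      rw [PySem.List.pyRange_one_cons hjm, List.foldl_cons]
      rw [pos_write m hm _ j _ (by omega) (by omega)]
      have hstep : (PySem.List.pyRange 0 (m + 1) 1).map
            (fun s => if s = (if j < 0 then m + 1 + j else j) then m - j + 1
                      else if 1 ≤ s ∧ s < j then m - s + 1 else 0)
          = (PySem.List.pyRange 0 (m + 1) 1).map (fun s => if 1 ≤ s ∧ s < j + 1 then m - s + 1 else 0) := by
        refine List.map_congr_left ?_
        intro s hs
        rw [if_neg (show ¬ j < 0 by omega)]
        by_cases hsj : s = j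
        · rw [if_pos hsj, if_pos (by omega), hsj]
        · rw [if_neg hsj]
          by_cases hc : 1 ≤ s ∧ s < j
          · rw [if_pos hc, if_pos (by omega)]
          · rw [if_neg hc, if_neg (by omega)]
      rw [hstep]
      exact ih (j + 1) (by omega) (by omega) (by omega)

lemma treefold_spec (n : Nat) (m : Int) (hm : 0 ≤ m) (hmn : m ≤ (n : Int)) :
    ∀ (k : Nat) (j : Int) (tree : List Int), (k : Int) = m + 1 - j → 1 ≤ j → j ≤ m + 1 →
    Good n tree (fun q => if (PySem.List.pyRange 1 j 1).any (fun i => decide (m - i + 1 = (q : Int))) then 1 else 0) →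
    Good n ((PySem.List.pyRange j (m + 1) 1).foldl (fun t i => segUpdate t n (m - i + 1) 1) tree)
      (aP m (fun s => if s ≤ 0 then 0 else m - s + 1)) := by
  intro k
  induction k with
  | zero =>
      intro j tree hk hj1 hj2 hgood
      have hj : j = m + 1 := by omega
      subst hj
      rw [PySem.List.pyRange_one_eq_nil (by omega), List.foldl_nil]
      refine good_congr n _ _ _ hgood ?_
      intro q hq1 hqn
      simp only [aP]
      rw [PySem.List.pyRange_one_cons (show (0 : Int) < m + 1 by omega), List.any_cons]
      have h0 : decide ((if (0 : Int) ≤ 0 then (0 : Int) else m - 0 + 1) = (q : Int)) = false := by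
        simp only [le_refl, if_pos, decide_eq_false_iff_not]
        omega
      rw [h0, Bool.false_or, show (0 : Int) + 1 = 1 by norm_num]
      have hcg : ((PySem.List.pyRange 1 (m + 1) 1).any fun s => decide ((if s ≤ 0 then 0 else m - s + 1) = (q : Int)))
          = ((PySem.List.pyRange 1 (m + 1) 1).any fun i => decide (m - i + 1 = (q : Int))) := by
        refine PySem.List.any_congr_mem ?_
        intro x hx
        rw [PySem.List.mem_pyRange_one] at hx
        rw [if_neg (by omega)]
      rw [hcg]
  | succ k ih =>
      intro j tree hk hj1 hj2 hgood
      have hjm : j < m + 1 := by omega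
      rw [PySem.List.pyRange_one_cons hjm, List.foldl_cons]
      set p : Nat := (m - j + 1).toNat with hp
      have hcast : (m - j + 1) = ((p : Nat) : Int) := by omega
      have hup := segUpdate_good n tree _ p 1 hgood (by omega) (by omega)
      rw [← hcast] at hup
      have hgood' : Good n (segUpdate tree n (m - j + 1) 1)
          (fun q => if (PySem.List.pyRange 1 (j + 1) 1).any (fun i => decide (m - i + 1 = (q : Int))) then 1 else 0) := by
        refine good_congr n _ _ _ hup ?_
        intro q hq1 hqn
        rw [PySem.List.pyRange_one_succ_right (by omega), List.any_append]
        by_cases hqp : q = p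
        · rw [if_pos hqp]
          have : decide (m - j + 1 = (q : Int)) = true := by
            simp only [decide_eq_true_eq]; omega
          simp [this]
        · rw [if_neg hqp]
          have hdec : decide (m - j + 1 = (q : Int)) = false := by
            simp only [decide_eq_false_iff_not]; omega
          simp only [List.any_cons, List.any_nil, hdec, Bool.or_false]
      exact ih (j + 1) _ (by omega) (by omega) (by omega) hgood'

lemma loop_eq (n : Nat) (m : Int) :
    ∀ (reqs : List Int) (P : Int → Int) (top : Int) (tree : List Int) (res : List String),
    0 ≤ m → 0 ≤ top →
    top + reqs.length ≤ (n : Int) →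
    (∀ f ∈ reqs, -(m + 1) ≤ f ∧ f ≤ m) →
    Good n tree (aP m P) →
    (∀ s, 0 ≤ s → s ≤ m → 0 ≤ P s ∧ P s ≤ top) →
    (∀ i j, 0 ≤ i → i ≤ m → 0 ≤ j → j ≤ m → P i = P j → 1 ≤ P i → i = j) →
    aLoop n reqs tree ((PySem.List.pyRange 0 (m + 1) 1).map P) top res
      = bLoop reqs ((PySem.List.pyRange 0 (m + 1) 1).map P) top res := by
  intro reqs
  induction reqs with
  | nil => intros; rfl
  | cons f rest ih =>
    intro P top tree res hm htop hfit hreq hgood hbnd hinj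
    obtain ⟨hf1, hfm⟩ := hreq f (List.mem_cons_self)
    have hn1 : 1 ≤ (n : Int) := by
      have := hfit
      simp only [List.length_cons] at this
      push_cast at this
      omega
    set g : Int := if f < 0 then m + 1 + f else f with hgdef
    have hg0 : 0 ≤ g := by rw [hgdef]; split_ifs <;> omega
    have hgm : g ≤ m := by rw [hgdef]; split_ifs <;> omega
    have hPgb := hbnd g hg0 hgm
    have htopn : top ≤ (n : Int) - 1 := by
      have := hfit
      simp only [List.length_cons] at this
      push_cast at this
      omega
    rw [aLoop, bLoop]
    rw [pos_read m hm P f hf1 hfm, ← hgdef]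
    -- the common per-request answer
    have hq : segQueryTop tree n (P g + 1) top
        = ((PySem.List.pyRange 0 (m + 1) 1).countP (fun i => decide (P g < P i)) : Int) := by
      unfold segQueryTop
      have e1 : (P g + 1 + (n : Int) - 1).toNat = n - 1 + (P g + 1).toNat := by omega
      have e2 : (top + (n : Int) - 1).toNat = n - 1 + top.toNat := by omega
      rw [e1, e2, good_query n tree (aP m P) hgood _ _ (by omega) (by omega) (by omega)]
      exact count_above m top P g hinj hbnd hg0 hgm _ _ (by omega) (by omega)
    have hcnt : ((PySem.List.pyRange 0 (m + 1) 1).map P).foldl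
          (fun acc q => if q > P g then acc + 1 else acc) (0 : Int)
        = ((PySem.List.pyRange 0 (m + 1) 1).countP (fun i => decide (P g < P i)) : Int) := by
      rw [PySem.List.foldl_ite_add_one (fun q => q > P g), List.countP_map, zero_add]
      rfl
    rw [hq, hcnt]
    rw [pos_write m hm P f (top + 1) hf1 hfm, ← hgdef]
    set P' : Int → Int := fun s => if s = g then top + 1 else P s with hP'
    have hcast2 : top + 1 = (((top + 1).toNat : Nat) : Int) := by omega
    -- Good is preserved
    have hgood' : Good n (segUpdate (segUpdate tree n (P g) 0) n (top + 1) 1) (aP m P') := by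
      have hmid : Good n (segUpdate tree n (P g) 0)
          (fun q => if (q : Int) = P g then 0 else aP m P q) := by
        rcases eq_or_lt_of_le hPgb.1 with hz | hpos
        · -- P g = 0: the update writes only the right spine
          rw [← hz]
          refine good_congr n _ _ _ (segUpdate_spine n tree (aP m P) 0 (by omega) hgood) ?_
          intro q hq1 hqn
          rw [if_neg (by omega)]
        · have hcast1 : P g = (((P g).toNat : Nat) : Int) := by omega
          have g1 := segUpdate_good n tree (aP m P) (P g).toNat 0 hgood (by omega) (by omega)
          rw [← hcast1] at g1
          refine good_congr n _ _ _ g1 ?_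
          intro q hq1 hqn
          by_cases hh : q = (P g).toNat
          · rw [if_pos hh, if_pos (by omega)]
          · rw [if_neg hh, if_neg (by omega)]
      have g2 := segUpdate_good n _ _ (top + 1).toNat 1 hmid (by omega) (by omega)
      rw [← hcast2] at g2
      refine good_congr n _ _ _ g2 ?_
      intro q hq1 hqn
      simp only [aP, hP']
      by_cases h2 : q = (top + 1).toNat
      · rw [if_pos h2]
        have hany : ((PySem.List.pyRange 0 (m + 1) 1).any
            fun s => decide ((if s = g then top + 1 else P s) = (q : Int))) = true := by
          rw [List.any_eq_true]
          refine ⟨g, by rw [PySem.List.mem_pyRange_one]; omega, ?_⟩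
          rw [if_pos rfl]
          simp only [decide_eq_true_eq]
          omega
        rw [hany, if_pos rfl]
      · rw [if_neg h2]
        by_cases h1 : (q : Int) = P g
        · rw [if_pos h1]
          have hany : ((PySem.List.pyRange 0 (m + 1) 1).any
              fun s => decide ((if s = g then top + 1 else P s) = (q : Int))) = false := by
            rw [List.any_eq_false]
            intro s hs
            rw [PySem.List.mem_pyRange_one] at hs
            simp only [decide_eq_true_eq]
            by_cases hsg : s = g
            · rw [if_pos hsg]; omega
            · rw [if_neg hsg]
              intro hPs
              have hsb := hbnd s hs.1 (by omega)
              exact hsg (hinj s g hs.1 (by omega) hg0 hgm (by omega) (by omega))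
          rw [hany]
          rfl
        · rw [if_neg h1]
          have hsame : ((PySem.List.pyRange 0 (m + 1) 1).any
              fun s => decide ((if s = g then top + 1 else P s) = (q : Int)))
              = ((PySem.List.pyRange 0 (m + 1) 1).any fun s => decide (P s = (q : Int))) := by
            refine PySem.List.any_congr_mem ?_
            intro x hx
            rw [PySem.List.mem_pyRange_one] at hx
            by_cases hxg : x = g
            · rw [if_pos hxg]
              have d1 : decide (top + 1 = (q : Int)) = false := by
                simp only [decide_eq_false_iff_not]; omega
              have d2 : decide (P g = (q : Int)) = false := by
                simp only [decide_eq_false_iff_not]; omega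
              rw [d1, hxg, d2]
            · rw [if_neg hxg]
          rw [hsame]
    refine ih P' (top + 1) _ _ hm (by omega) ?_ ?_ hgood' ?_ ?_
    · have := hfit
      simp only [List.length_cons] at this
      push_cast at this ⊢
      omega
    · intro f' hf'
      exact hreq f' (List.mem_cons_of_mem f hf')
    · intro s h0 h1
      simp only [hP']
      by_cases hh : s = g
      · rw [if_pos hh]; omega
      · rw [if_neg hh]
        have := hbnd s h0 h1
        omega
    · intro i j h1 h2 h3 h4 heq hge1
      simp only [hP'] at heq hge1
      by_cases hi : i = g <;> by_cases hj : j = g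
      · rw [hi, hj]
      · rw [if_pos hi, if_neg hj] at heq
        have := hbnd j h3 h4
        omega
      · rw [if_neg hi, if_pos hj] at heq
        have := hbnd i h1 h2
        omega
      · rw [if_neg hi, if_neg hj] at heq
        rw [if_neg hi] at hge1
        exact hinj i j h1 h2 h3 h4 heq hge1

lemma case_eq (m r : Int) (reqs : List Int)
    (h1 : m < 0 → reqs = [])
    (h2 : 0 ≤ m → (∀ f ∈ reqs, -(m + 1) ≤ f ∧ f ≤ m) ∧
      m + (reqs.length : Int) ≤ (if m + r ≤ 0 then 1 else (2 : Int) ^ PySem.Int.bitLength (m + r))) :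
    caseA m r reqs = caseB m reqs := by
  rcases lt_or_ge m 0 with hm | hm
  · rw [h1 hm]
    rfl
  · obtain ⟨hreq, hcap⟩ := h2 hm
    have hNn := N_le_pvGrow m r
    simp only [caseA, caseB]
    set n := pvGrow (m + r + 1) 1 with hn
    have hfit : m + (reqs.length : Int) ≤ (n : Int) := le_trans hcap hNn
    have hn1 : 0 < n := (pvGrow_ge (m + r + 1) 1 (by norm_num)).1
    rw [aInit_fst, aInit_snd]
    have hrep : ∀ k : Nat, (List.replicate (2 * n) (0 : Int)).getD k 0 = 0 := by
      intro k
      simp only [List.getD, List.getElem?_replicate]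
      split <;> rfl
    have hgood0 : Good n (List.replicate (2 * n) 0)
        (fun q => if (PySem.List.pyRange 1 1 1).any (fun i => decide (m - i + 1 = (q : Int))) then 1 else 0) := by
      refine ⟨by simp, ?_, ?_⟩
      · intro v h1' h2' h3'; rw [hrep, hrep, hrep]; ring
      · intro p h1' h2'
        rw [hrep, PySem.List.pyRange_one_eq_nil (by omega)]
        simp
    have hG := treefold_spec n m hm (by omega) m.toNat 1 _ (by omega) (by omega) (by omega) hgood0
    have hpos0 : List.replicate (m + 1).toNat (0 : Int)
        = (PySem.List.pyRange 0 (m + 1) 1).map (fun s => if 1 ≤ s ∧ s < 1 then m - s + 1 else 0) := by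
      refine replicate_eq_map m _ ?_
      intro s h0 h1'
      rw [if_neg (by omega)]
    have hPOS := posfold_spec m hm m.toNat 1 (by omega) (by omega) (by omega)
    rw [hpos0, hPOS]
    congr 1
    refine loop_eq n m reqs (fun s => if 1 ≤ s ∧ s ≤ m then m - s + 1 else 0) m _ []
      hm hm (by omega) hreq ?_ ?_ ?_
    · refine good_congr n _ _ _ hG ?_
      intro q hq1 hqn
      simp only [aP]
      have hcg : ((PySem.List.pyRange 0 (m + 1) 1).any
            fun s => decide ((if s ≤ 0 then (0 : Int) else m - s + 1) = (q : Int)))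
          = ((PySem.List.pyRange 0 (m + 1) 1).any
            fun s => decide ((if 1 ≤ s ∧ s ≤ m then m - s + 1 else (0 : Int)) = (q : Int))) := by
        refine PySem.List.any_congr_mem ?_
        intro x hx
        rw [PySem.List.mem_pyRange_one] at hx
        have : (if x ≤ 0 then (0 : Int) else m - x + 1) = (if 1 ≤ x ∧ x ≤ m then m - x + 1 else (0 : Int)) := by
          split_ifs <;> omega
        rw [this]
      rw [hcg]
    · intro s h0 h1'
      beta_reduce
      split_ifs <;> omega
    · intro i j hi1 hi2 hj1 hj2 heq hge
      beta_reduce at heq hge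
      split_ifs at heq hge <;> omega

-- ===== VERDICT (by name: the statement is the Claim_ definition above) =====
theorem solve_movie_cases_spec : Claim_equal_solve_movie_cases := by
  intro cases hdom hpre
  show solve_movie_cases cases = solve_movie_cases_alt cases
  unfold solve_movie_cases solve_movie_cases_alt
  rw [PySem.List.foldl_append_singleton_eq_map, PySem.List.foldl_append_singleton_eq_map]
  simp only [List.nil_append]
  refine List.map_congr_left ?_
  intro c hc
  obtain ⟨h1, h2⟩ := hpre c hc
  exact case_eq c.1 c.2.1 c.2.2 h1 h2
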